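-- pv_equiv track=rewrite | github.com/Ionitedev/ivis-youtrending | data_process/langdet.py | get_lang_index
-- ===== SOURCE A (Python) =====
-- def get_lang_index(lang_dict):
--     # Save language indices
--     lang_idx = {}
--     for vid in lang_dict:
--         lang = lang_dict[vid][1] # language
--         if not lang in lang_idx:
--             lang_idx[lang] = []
--         lang_idx[lang].append(vid)
--     return lang_idx
-- ===== SOURCE B (Python) =====
-- def get_lang_index(lang_dict):
--     # Two passes: dedup the languages in first-occurrence order, then one
--     # filtering comprehension per language over the precomputed (lang, vid) pairs.
--     pairs = [(lang_dict[v][1], v) for v in lang_dict]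
--     langs = dict.fromkeys(l for l, _ in pairs)
--     return {lang: [v for l, v in pairs if l == lang] for lang in langs}
-- ===== Notes on version B (the rewrite author's own statement) =====
-- stated objective: alternative
-- what changed: Replaces the single-pass dict-building loop (membership test + append into a mutable dict) by a two-pass dedup-then-filter comprehension: first collect the distinct languages in first-occurrence order with dict.fromkeys, then build each group by filtering the video ids once per language.
import Mathlib
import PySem

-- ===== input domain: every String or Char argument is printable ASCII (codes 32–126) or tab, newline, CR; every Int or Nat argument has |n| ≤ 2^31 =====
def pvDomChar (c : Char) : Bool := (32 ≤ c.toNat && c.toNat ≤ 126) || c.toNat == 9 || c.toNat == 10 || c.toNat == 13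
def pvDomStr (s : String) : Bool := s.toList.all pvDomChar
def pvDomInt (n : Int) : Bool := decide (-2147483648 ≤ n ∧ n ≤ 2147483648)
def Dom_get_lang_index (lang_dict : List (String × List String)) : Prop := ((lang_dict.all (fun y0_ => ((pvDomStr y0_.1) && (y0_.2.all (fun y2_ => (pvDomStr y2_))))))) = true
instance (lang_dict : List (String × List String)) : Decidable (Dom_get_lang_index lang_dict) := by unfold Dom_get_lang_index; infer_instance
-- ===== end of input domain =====

-- B groups the video ids by language via dedup-then-filter instead of A's single
-- dict-building loop; same result, no speed claim (equivalence is about the return value).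

-- lang_dict[vid][1], total with "" outside Pre_ (Pre_ guarantees the index is in range)
def pvLangOf (p : String × List String) : String := (PySem.List.pyGet? p.2 1).getD ""

-- ===== PORT A =====
def get_lang_index (lang_dict : List (String × List String)) : List (String × List String) :=
  (lang_dict.foldl (fun lang_idx p =>
      let lang := pvLangOf p
      let lang_idx := if lang_idx.contains lang then lang_idx
                      else lang_idx.insert lang ([] : List String)
      lang_idx.modify lang [] (fun vs => vs ++ [p.1]))
    PySem.Dict.empty).items

-- ===== PORT B =====
def get_lang_index_alt (lang_dict : List (String × List String)) : List (String × List String) :=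
  let pairs := lang_dict.map (fun p => (pvLangOf p, p.1))
  let langs := PySem.List.dedup (pairs.map Prod.fst)
  langs.map (fun l => (l, (pairs.filter (fun q => q.1 == l)).map Prod.snd))

-- ===== PRECONDITION & SPEC =====
-- Pre_ excludes entries whose value list has fewer than two elements, where the Python A
-- raises IndexError on lang_dict[vid][1] (B raises likewise), and duplicate keys, which a
-- real Python dict cannot contain.
def Pre_get_lang_index (lang_dict : List (String × List String)) : Prop :=
  (∀ p ∈ lang_dict, 2 ≤ p.2.length) ∧ (lang_dict.map Prod.fst).Nodup
instance (lang_dict : List (String × List String)) : Decidable (Pre_get_lang_index lang_dict) := by unfold Pre_get_lang_index; infer_instance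

def pvWitness_get_lang_index : (List (String × List String)) :=
  [("v1", ["t", "en"]), ("v2", ["u", "fr"]), ("v3", ["w", "en"])]

def Spec_get_lang_index (lang_dict : List (String × List String)) (out : List (String × List String)) : Prop := out = get_lang_index_alt lang_dict
instance (lang_dict : List (String × List String)) (out : List (String × List String)) : Decidable (Spec_get_lang_index lang_dict out) := by unfold Spec_get_lang_index; infer_instance

-- ===== CLAIM (what is proved, stated in full; the proofs are below) =====
def Claim_equal_get_lang_index : Prop := ∀ (lang_dict : List (String × List String)), Dom_get_lang_index lang_dict → Pre_get_lang_index lang_dict → Spec_get_lang_index lang_dict (get_lang_index lang_dict)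

-- ===== LEMMAS AND PROOFS =====

-- A's loop body ('if lang not in d: d[lang] = []' then append) is exactly a modify
-- with default [] -- whether or not the key is already present.
theorem pv_step_eq (d : PySem.Dict String (List String)) (p : String × List String) :
    ((if d.contains (pvLangOf p) then d else d.insert (pvLangOf p) ([] : List String)).modify
        (pvLangOf p) [] (fun vs => vs ++ [p.1]))
      = d.modify (pvLangOf p) [] (fun vs => vs ++ [p.1]) := by
  by_cases h : d.contains (pvLangOf p)
  · simp [h]
  · simp only [PySem.Dict.modify, h, Bool.false_eq_true, if_false,
      PySem.Dict.getD_insert_self, PySem.Dict.insert_insert_self]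
    rw [PySem.Dict.getD_of_not_contains d [] (by simpa using h)]

theorem pv_main (l : List (String × List String)) :
    get_lang_index l = get_lang_index_alt l := by
  unfold get_lang_index get_lang_index_alt
  simp only []
  rw [PySem.List.foldl_congr_mem l _
        (fun (d : PySem.Dict String (List String)) p =>
          d.modify (pvLangOf p) [] (fun vs => vs ++ [p.1]))
        PySem.Dict.empty (fun acc x _ => pv_step_eq acc x)]
  rw [← List.foldl_map (f := fun p : String × List String => (pvLangOf p, p.1))
      (g := fun (d : PySem.Dict String (List String)) (q : String × String) =>
        d.modify q.1 [] (fun vs => vs ++ [q.2]))]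
  have hkeys : (List.foldl (fun (d : PySem.Dict String (List String)) (q : String × String) =>
        d.modify q.1 [] (fun vs => vs ++ [q.2])) PySem.Dict.empty (l.map (fun p => (pvLangOf p, p.1)))).keys
      = PySem.Set.ofList (l.map pvLangOf) := by
    rw [PySem.Dict.keys_foldl_modify_key (l.map (fun p => (pvLangOf p, p.1))) Prod.fst []
        (fun d q => fun vs => vs ++ [q.2]) PySem.Dict.empty]
    simp [PySem.Set.update_nil_left, List.map_map, Function.comp_def, PySem.Dict.keys_empty]
  have hnodup : (List.foldl (fun (d : PySem.Dict String (List String)) (q : String × String) =>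
        d.modify q.1 [] (fun vs => vs ++ [q.2])) PySem.Dict.empty (l.map (fun p => (pvLangOf p, p.1)))).keys.Nodup := by
    rw [hkeys]; exact PySem.Set.nodup_ofList _
  rw [PySem.Dict.items_eq_map_keys _ hnodup [], hkeys, PySem.List.dedup_eq_ofList]
  simp only [List.map_map, Function.comp_def]
  apply List.map_congr_left
  intro k _
  rw [PySem.Dict.getD_foldl_modify_append]
  simp

-- ===== VERDICT (by name: the statement is the Claim_ definition above) =====
theorem get_lang_index_spec : Claim_equal_get_lang_index := by
  intro l _ _; exact pv_main l
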